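-- pv_equiv track=rewrite | github.com/Reyralona/mus | mus.py | getKeyChords
-- ===== SOURCE A (Python) =====
-- def batch(iterable, max_batch_size):
--     """ Batches an iterable into lists of given maximum size, yielding them one by one. """
--     batch = []
--     for element in iterable:
--         batch.append(element)
--         if len(batch) >= max_batch_size:
--             yield batch
--             batch = []
--     if len(batch) > 0:
--         yield batch
--
-- def fEven(start, n):
--     return [start + (i*2) for i in range(0,n)]
--
-- def getKeyChords(key, notenum=3):
--
--     rng = fEven(0, notenum)
--     key = key * 16
--     outlist = []
--     for i in range(7):
--         for j in rng:
--             outlist.append(key[i + j])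
--
--     return list(batch(outlist, notenum))
-- ===== SOURCE B (Python) =====
-- def getKeyChords(key, notenum=3):
--     key = key * 16
--     cols = [[key[i + 2 * j] for i in range(7)] for j in range(notenum)]
--     return [list(c) for c in zip(*cols)]
-- ===== Notes on version B (the rewrite author's own statement) =====
-- stated objective: alternative
-- what changed: Replaces A's flatten-all-notes-into-one-list-then-batch-generator pass by a column-major construction (one list per chord voice) followed by a zip transpose into the 7 chords.
import Mathlib
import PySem

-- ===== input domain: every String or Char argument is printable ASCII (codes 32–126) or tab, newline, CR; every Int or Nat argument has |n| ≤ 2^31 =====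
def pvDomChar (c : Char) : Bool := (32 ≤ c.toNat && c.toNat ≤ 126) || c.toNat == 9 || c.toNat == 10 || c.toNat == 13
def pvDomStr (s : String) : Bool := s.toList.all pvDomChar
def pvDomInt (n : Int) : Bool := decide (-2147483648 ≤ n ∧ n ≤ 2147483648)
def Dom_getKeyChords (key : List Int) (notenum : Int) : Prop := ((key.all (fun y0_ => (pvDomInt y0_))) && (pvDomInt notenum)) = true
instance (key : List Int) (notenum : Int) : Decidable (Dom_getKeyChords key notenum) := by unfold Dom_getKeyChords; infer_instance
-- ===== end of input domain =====

-- B replaces A's flatten-then-batch pass by a column-major build plus transpose (different decomposition, same cost); equivalence of return values is proved on Pre_ (inputs where A does not raise IndexError).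

-- ===== PORT A =====
def fEven (start n : Int) : List Int :=
  (PySem.List.pyRange 0 n 1).map (fun i => start + i * 2)

-- batch(iterable, max_batch_size) materialised by list(...): fold carrying (yielded chunks, current batch)
def batchStep (n : Int) (st : List (List Int) × List Int) (x : Int) : List (List Int) × List Int :=
  let b := st.2 ++ [x]
  if (b.length : Int) ≥ n then (st.1 ++ [b], []) else (st.1, b)

def batchList (xs : List Int) (n : Int) : List (List Int) :=
  let st := xs.foldl (batchStep n) ([], [])
  if st.2.length > 0 then st.1 ++ [st.2] else st.1

def getKeyChords (key : List Int) (notenum : Int) : List (List Int) :=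
  let rng := fEven 0 notenum
  let key16 := (List.replicate 16 key).flatten
  let outlist := (PySem.List.pyRange 0 7 1).foldl
    (fun acc i => rng.foldl (fun acc j => acc ++ [PySem.List.pyGetD key16 (i + j) 0]) acc) []
  batchList outlist notenum

-- ===== PORT B =====
-- zip(*cols): truncate to the shortest column; empty cols gives []
def pyZipStar (cols : List (List Int)) : List (List Int) :=
  match cols with
  | [] => []
  | c :: cs =>
    let m := cs.foldl (fun acc l => Nat.min acc l.length) c.length
    (List.range m).map (fun k => cols.map (fun col => col.getD k 0))

def getKeyChords_alt (key : List Int) (notenum : Int) : List (List Int) :=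
  let key16 := (List.replicate 16 key).flatten
  let cols := (PySem.List.pyRange 0 notenum 1).map
    (fun j => (PySem.List.pyRange 0 7 1).map (fun i => PySem.List.pyGetD key16 (i + 2 * j) 0))
  pyZipStar cols

-- ===== PRECONDITION & SPEC =====
-- Pre_ excludes exactly the inputs where Python A raises IndexError (largest index 6+2*(notenum-1) reaching past key*16); B raises there too.
def Pre_getKeyChords (key : List Int) (notenum : Int) : Prop :=
  notenum ≤ 0 ∨ 2 * notenum + 4 < 16 * (key.length : Int)
instance (key : List Int) (notenum : Int) : Decidable (Pre_getKeyChords key notenum) := by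
  unfold Pre_getKeyChords; infer_instance
def pvWitness_getKeyChords : List Int × Int := ([0, 2, 4, 5, 7, 9, 11], 3)

def Spec_getKeyChords (key : List Int) (notenum : Int) (out : List (List Int)) : Prop := out = getKeyChords_alt key notenum
instance (key : List Int) (notenum : Int) (out : List (List Int)) : Decidable (Spec_getKeyChords key notenum out) := by unfold Spec_getKeyChords; infer_instance

-- ===== CLAIM (what is proved, stated in full; the proofs are below) =====
def Claim_equal_getKeyChords : Prop := ∀ (key : List Int) (notenum : Int), Dom_getKeyChords key notenum → Pre_getKeyChords key notenum → Spec_getKeyChords key notenum (getKeyChords key notenum)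

-- ===== LEMMAS AND PROOFS =====

theorem foldl_app_map (l : List Int) (acc : List Int) (f : Int → Int) :
    l.foldl (fun a j => a ++ [f j]) acc = acc ++ l.map f := by
  induction l generalizing acc with
  | nil => simp
  | cons x xs ih => simp [List.foldl, ih, List.append_assoc]

theorem batch_row (n : Int) (row : List Int) (hrow : row ≠ [])
    (b : List Int) (acc : List (List Int))
    (hlen : (b.length : Int) + row.length = n) :
    List.foldl (batchStep n) (acc, b) row = (acc ++ [b ++ row], []) := by
  induction row generalizing b acc with
  | nil => exact absurd rfl hrow
  | cons x xs ih =>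
    have hlen' : (b.length : Int) + xs.length + 1 = n := by
      simp only [List.length_cons] at hlen; push_cast at hlen ⊢; omega
    rw [List.foldl_cons]
    have hx : batchStep n (acc, b) x
        = if ((b ++ [x]).length : Int) ≥ n then (acc ++ [b ++ [x]], []) else (acc, b ++ [x]) := rfl
    have hbx : ((b ++ [x]).length : Int) = b.length + 1 := by
      simp only [List.length_append, List.length_cons, List.length_nil]; push_cast; ring
    cases xs with
    | nil =>
      have hc : ((b ++ [x]).length : Int) ≥ n := by
        rw [hbx]; simp only [List.length_nil] at hlen'; push_cast at hlen'; omega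
      rw [hx, if_pos hc]
      simp
    | cons y ys =>
      have hys : ((y :: ys).length : Int) = (ys.length : Int) + 1 := by
        simp only [List.length_cons]; push_cast; ring
      have hc : ¬ ((b ++ [x]).length : Int) ≥ n := by
        rw [hbx, not_le]; rw [hys] at hlen'; omega
      rw [hx, if_neg hc]
      rw [ih (by simp) (b ++ [x]) acc (by rw [hbx, hys]; omega)]
      simp

theorem foldl_min_const (cs : List (List Int)) (m : Nat)
    (h : ∀ l ∈ cs, l.length = m) :
    cs.foldl (fun acc l => Nat.min acc l.length) m = m := by
  induction cs with
  | nil => rfl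
  | cons c cs ih =>
    have hc : c.length = m := h c (by simp)
    simp only [List.foldl, hc, Nat.min_self]
    exact ih (fun l hl => h l (by simp [hl]))

-- ===== VERDICT =====
theorem getKeyChords_spec : Claim_equal_getKeyChords := by
  intro key notenum _ hpre
  unfold Spec_getKeyChords
  simp only [getKeyChords, getKeyChords_alt]
  set key16 := (List.replicate 16 key).flatten with hk16
  by_cases hn : notenum ≤ 0
  · rw [PySem.List.pyRange_one_eq_nil (show (notenum : Int) ≤ 0 from hn)]
    simp [fEven, PySem.List.pyRange_one_eq_nil (show (notenum : Int) ≤ 0 from hn),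
      batchList, pyZipStar]
  · rw [not_le] at hn
    have hlen : 2 * notenum + 4 < 16 * (key.length : Int) := by
      rcases hpre with h | h
      · omega
      · exact h
    have h7 : PySem.List.pyRange 0 7 1 = [0, 1, 2, 3, 4, 5, 6] := by decide
    have hrnglen : ((PySem.List.pyRange 0 notenum 1).length : Int) = notenum := by
      rw [PySem.List.length_pyRange_one]; omega
    have hrngne : PySem.List.pyRange 0 notenum 1 ≠ [] := by
      intro h; rw [h] at hrnglen; simp at hrnglen; omega
    have haux : ∀ (i : Int) (acc : List Int),
        (fEven 0 notenum).foldl (fun a j => a ++ [PySem.List.pyGetD key16 (i + j) 0]) acc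
        = acc ++ (PySem.List.pyRange 0 notenum 1).map
            (fun j => PySem.List.pyGetD key16 (i + 2 * j) 0) := by
      intro i acc
      rw [foldl_app_map, fEven, List.map_map]
      congr 1
      apply List.map_congr_left
      intro t _
      simp only [Function.comp_apply]
      congr 1
      ring
    set rowA : Int → List Int := fun i =>
      (PySem.List.pyRange 0 notenum 1).map (fun j => PySem.List.pyGetD key16 (i + 2 * j) 0)
      with hrowA
    have hrowlen : ∀ i : Int, ((rowA i).length : Int) = notenum := by
      intro i; rw [hrowA]; simpa using hrnglen
    have hrowne : ∀ i : Int, rowA i ≠ [] := by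
      intro i h
      have := hrowlen i; rw [h] at this; simp at this; omega
    have houtlist : (PySem.List.pyRange 0 7 1).foldl
        (fun acc i => (fEven 0 notenum).foldl
          (fun a j => a ++ [PySem.List.pyGetD key16 (i + j) 0]) acc) []
        = rowA 0 ++ (rowA 1 ++ (rowA 2 ++ (rowA 3 ++ (rowA 4 ++ (rowA 5 ++ rowA 6))))) := by
      rw [h7]
      simp only [List.foldl_cons, List.foldl_nil, haux]
      simp [hrowA, List.append_assoc]
    rw [houtlist]
    have hbatch : batchList
        (rowA 0 ++ (rowA 1 ++ (rowA 2 ++ (rowA 3 ++ (rowA 4 ++ (rowA 5 ++ rowA 6)))))) notenum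
        = [rowA 0, rowA 1, rowA 2, rowA 3, rowA 4, rowA 5, rowA 6] := by
      unfold batchList
      rw [List.foldl_append, batch_row notenum _ (hrowne 0) [] [] (by simpa using hrowlen 0)]
      rw [List.foldl_append, batch_row notenum _ (hrowne 1) [] _ (by simpa using hrowlen 1)]
      rw [List.foldl_append, batch_row notenum _ (hrowne 2) [] _ (by simpa using hrowlen 2)]
      rw [List.foldl_append, batch_row notenum _ (hrowne 3) [] _ (by simpa using hrowlen 3)]
      rw [List.foldl_append, batch_row notenum _ (hrowne 4) [] _ (by simpa using hrowlen 4)]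
      rw [List.foldl_append, batch_row notenum _ (hrowne 5) [] _ (by simpa using hrowlen 5)]
      rw [batch_row notenum _ (hrowne 6) [] _ (by simpa using hrowlen 6)]
      simp
    rw [hbatch]
    -- B's side
    set colF : Int → List Int := fun j =>
      (PySem.List.pyRange 0 7 1).map (fun i => PySem.List.pyGetD key16 (i + 2 * j) 0) with hcolF
    obtain ⟨j0, js, hj⟩ : ∃ j0 js, PySem.List.pyRange 0 notenum 1 = j0 :: js := by
      cases h : PySem.List.pyRange 0 notenum 1 with
      | nil => exact absurd h hrngne
      | cons a b => exact ⟨a, b, rfl⟩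
    rw [hj]
    simp only [List.map_cons, pyZipStar]
    have hcollen : ∀ j : Int, (colF j).length = 7 := by
      intro j; rw [hcolF]; simp [h7]
    have hmin : (js.map colF).foldl (fun acc l => Nat.min acc l.length) (colF j0).length = 7 := by
      rw [hcollen j0]
      exact foldl_min_const _ 7 (by
        intro l hl
        obtain ⟨j, _, rfl⟩ := List.mem_map.mp hl
        exact hcollen j)
    rw [hmin]
    have hrange7 : List.range 7 = [0, 1, 2, 3, 4, 5, 6] := by decide
    rw [hrange7]
    have hcolget : ∀ (k : Nat) (j : Int), k < 7 →
        (colF j).getD k 0 = PySem.List.pyGetD key16 ((k : Int) + 2 * j) 0 := by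
      intro k j hk
      rw [hcolF]
      simp only [h7, List.map_cons, List.map_nil]
      interval_cases k <;> simp [List.getD]
    have hrowk : ∀ (k : Nat), k < 7 →
        ((colF j0 :: js.map colF).map (fun col => col.getD k 0)) = rowA (k : Int) := by
      intro k hk
      rw [hrowA, hj, show colF j0 :: js.map colF = (j0 :: js).map colF from rfl, List.map_map]
      apply List.map_congr_left
      intro j _
      simp only [Function.comp_apply]
      exact hcolget k j hk
    have e0 := hrowk 0 (by omega); have e1 := hrowk 1 (by omega)
    have e2 := hrowk 2 (by omega); have e3 := hrowk 3 (by omega)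
    have e4 := hrowk 4 (by omega); have e5 := hrowk 5 (by omega)
    have e6 := hrowk 6 (by omega)
    norm_num at e0 e1 e2 e3 e4 e5 e6
    simp only [List.map_cons, List.map_nil] at e0 e1 e2 e3 e4 e5 e6 ⊢
    norm_num at e0 e1 e2 e3 e4 e5 e6 ⊢
    refine ⟨?_, ?_, ?_, ?_, ?_, ?_, ?_⟩ <;>
      first
        | rfl
        | exact e0.symm | exact e1.symm | exact e2.symm | exact e3.symm
        | exact e4.symm | exact e5.symm | exact e6.symm
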